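-- pv_equiv track=rewrite | github.com/ookeyan/CodingExams | challenge/max_binary_path.py | solution
-- ===== SOURCE A (Python) =====
-- def solution(N):
--     num = str(bin(N)[2:])
--
--     gap = max_gap = 0
--     for char in num:
--         if char == "0":
--             gap += 1
--         else:
--             max_gap = max(gap, max_gap)
--             gap = 0
--
--     return max_gap
-- ===== SOURCE B (Python) =====
-- def solution(N):
--     s = bin(N)[2:]
--     pos = [i for i, c in enumerate(s) if c == '1']
--     best = 0
--     for x, y in zip(pos, pos[1:]):
--         best = max(best, y - x - 1)
--     return best
-- ===== Notes on version B (the rewrite author's own statement) =====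
-- stated objective: alternative
-- what changed: B replaces A's running gap/max accumulator scan with an index-then-pairwise strategy: it collects the positions of the '1' bits and takes the maximum of (next - prev - 1) over adjacent pairs.
import Mathlib
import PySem

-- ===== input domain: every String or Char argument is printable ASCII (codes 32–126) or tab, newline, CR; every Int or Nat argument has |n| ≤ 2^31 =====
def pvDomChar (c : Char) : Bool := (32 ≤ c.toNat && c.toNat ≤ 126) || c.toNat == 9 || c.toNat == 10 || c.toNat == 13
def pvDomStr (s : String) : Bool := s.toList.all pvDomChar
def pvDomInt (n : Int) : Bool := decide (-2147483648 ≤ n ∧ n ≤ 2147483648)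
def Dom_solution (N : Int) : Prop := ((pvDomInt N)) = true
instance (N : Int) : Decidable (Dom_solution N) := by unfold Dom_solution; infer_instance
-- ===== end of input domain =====

-- B collects the positions of the '1' bits and takes the max of (next - prev - 1) over
-- adjacent pairs, instead of A's running gap/max-gap accumulator scan (objective: alternative).

-- ===== PORT A =====
-- bin(n) for a Nat n ≥ 1, most-significant bit first; toBin 0 = [] (bin(0)[2:] is handled in binTail)
def toBin (n : Nat) : List Char :=
  if n = 0 then []
  else toBin (n / 2) ++ [if n % 2 = 1 then '1' else '0']
decreasing_by exact Nat.div_lt_self (Nat.pos_of_ne_zero (by assumption)) (by omega)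

-- bin(N)[2:] : for negative N, bin(-5) = '-0b101' and [2:] leaves 'b101'
def binTail (N : Int) : List Char :=
  if N < 0 then 'b' :: toBin N.natAbs
  else if N = 0 then ['0']
  else toBin N.natAbs

def solution (N : Int) : Int :=
  let num := binTail N
  (num.foldl (fun (st : Int × Int) c =>
      if c = '0' then (st.1 + 1, st.2) else (0, max st.1 st.2)) (0, 0)).2

-- ===== PORT B =====
def solution_alt (N : Int) : Int :=
  let s := binTail N
  let pos : List Int :=
    (PySem.List.enumerate s 0).filterMap (fun p => if p.2 = '1' then some p.1 else none)
  -- pos[1:] is pos.tail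
  (pos.zip pos.tail).foldl (fun best q => max best (q.2 - q.1 - 1)) 0

-- ===== PRECONDITION & SPEC =====
def Spec_solution (N : Int) (out : Int) : Prop := out = solution_alt N
instance (N : Int) (out : Int) : Decidable (Spec_solution N out) := by unfold Spec_solution; infer_instance

-- ===== CLAIM (what is proved, stated in full; the proofs are below) =====
def Claim_equal_solution : Prop := ∀ (N : Int), Dom_solution N → Spec_solution N (solution N)

-- ===== LEMMAS AND PROOFS =====

-- the successive gap values A flushes while scanning cs, starting with current gap g
def gapsList : List Char → Int → List Int
  | [], _ => []
  | c :: cs, g => if c = '0' then gapsList cs (g + 1) else g :: gapsList cs 0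

-- positions (from i) of the '1' characters of cs
def onesPos : List Char → Int → List Int
  | [], _ => []
  | c :: cs, i => if c = '1' then i :: onesPos cs (i + 1) else onesPos cs (i + 1)

-- consecutive differences minus one, seeded with a previous position
def diffs : Int → List Int → List Int
  | _, [] => []
  | p, q :: qs => (q - p - 1) :: diffs q qs

theorem toBin_mem : ∀ (n : Nat), ∀ c ∈ toBin n, c = '0' ∨ c = '1' := by
  intro n
  fun_induction toBin n with
  | case1 => simp
  | case2 n hn ih =>
      intro c hc
      rcases List.mem_append.mp hc with h | h
      · exact ih c h
      · simp only [List.mem_singleton] at h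
        subst h; split <;> simp

theorem toBin_head : ∀ (n : Nat), n ≠ 0 → ∃ rest, toBin n = '1' :: rest := by
  intro n
  fun_induction toBin n with
  | case1 => intro h'; simp_all
  | case2 n hn ih =>
      intro _
      by_cases h2 : n / 2 = 0
      · have hn1 : n = 1 := by omega
        subst hn1
        exact ⟨[], by simp [toBin]⟩
      · obtain ⟨r, hr⟩ := ih h2
        exact ⟨r ++ [if n % 2 = 1 then '1' else '0'], by rw [hr]; simp⟩

theorem foldA_eq : ∀ (cs : List Char) (g m : Int),
    (cs.foldl (fun (st : Int × Int) c =>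
      if c = '0' then (st.1 + 1, st.2) else (0, max st.1 st.2)) (g, m)).2
    = (gapsList cs g).foldl max m := by
  intro cs
  induction cs with
  | nil => intro g m; simp [gapsList]
  | cons c cs ih =>
      intro g m
      by_cases hc : c = '0'
      · simp [hc, gapsList, ih]
      · simp [hc, gapsList, ih, max_comm]

theorem zip_fold_eq : ∀ (l : List Int) (p acc : Int),
    (((p :: l).zip l).foldl (fun best q => max best (q.2 - q.1 - 1)) acc)
    = (diffs p l).foldl max acc := by
  intro l
  induction l with
  | nil => intro p acc; simp [diffs]
  | cons q qs ih =>
      intro p acc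
      rw [show (p :: q :: qs).zip (q :: qs) = (p, q) :: (q :: qs).zip qs from rfl]
      simp only [List.foldl_cons, diffs]
      exact ih q (max acc (q - p - 1))

theorem enum_filter_eq : ∀ (cs : List Char) (k : Int),
    (PySem.List.enumerate cs k).filterMap (fun p => if p.2 = '1' then some p.1 else none)
    = onesPos cs k := by
  intro cs
  induction cs with
  | nil => intro k; simp [PySem.List.enumerate_nil, onesPos]
  | cons c cs ih =>
      intro k
      by_cases hc : c = '1' <;>
        simp [PySem.List.enumerate_cons, hc, onesPos, ih]

theorem diffs_onesPos : ∀ (cs : List Char), (∀ c ∈ cs, c = '0' ∨ c = '1') →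
    ∀ (i prev : Int), diffs prev (onesPos cs i) = gapsList cs (i - prev - 1) := by
  intro cs
  induction cs with
  | nil => intro _ i prev; simp [onesPos, gapsList, diffs]
  | cons c cs ih =>
      intro hok i prev
      have hcs : ∀ c ∈ cs, c = '0' ∨ c = '1' := fun x hx => hok x (List.mem_cons_of_mem _ hx)
      rcases hok c List.mem_cons_self with hc | hc
      · have h1 : i + 1 - prev - 1 = i - prev - 1 + 1 := by ring
        simp [onesPos, gapsList, hc, ih hcs, h1]
      · have h0 : i + 1 - i - 1 = 0 := by ring
        simp [onesPos, gapsList, hc, diffs, ih hcs, h0]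

-- A = B as soon as the scanned list is '1' :: rest with only '0'/'1' characters,
-- for any enumeration start index i
theorem core_eq (rest : List Char) (hok : ∀ c ∈ rest, c = '0' ∨ c = '1') (i : Int) :
    ((onesPos ('1' :: rest) i).zip (onesPos ('1' :: rest) i).tail).foldl
      (fun best q => max best (q.2 - q.1 - 1)) 0
    = (('1' :: rest).foldl (fun (st : Int × Int) c =>
        if c = '0' then (st.1 + 1, st.2) else (0, max st.1 st.2)) (0, 0)).2 := by
  have hpos : onesPos ('1' :: rest) i = i :: onesPos rest (i + 1) := by simp [onesPos]
  rw [hpos]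
  simp only [List.tail_cons]
  rw [zip_fold_eq, diffs_onesPos rest hok (i + 1) i]
  have h0 : i + 1 - i - 1 = 0 := by ring
  rw [h0, foldA_eq]
  simp [gapsList]

theorem solution_eq_alt (N : Int) : solution N = solution_alt N := by
  unfold solution solution_alt
  simp only [enum_filter_eq]
  by_cases hneg : N < 0
  · have hN0 : N.natAbs ≠ 0 := by omega
    obtain ⟨rest, hr⟩ := toBin_head N.natAbs hN0
    have hok : ∀ c ∈ rest, c = '0' ∨ c = '1' := by
      intro c hc
      exact toBin_mem N.natAbs c (by rw [hr]; exact List.mem_cons_of_mem _ hc)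
    have hb : binTail N = 'b' :: '1' :: rest := by simp [binTail, hneg, hr]
    rw [hb]
    have honeb : onesPos ('b' :: '1' :: rest) 0 = onesPos ('1' :: rest) 1 := by
      simp [onesPos]
    simp only [List.foldl_cons, honeb]
    have := core_eq rest hok 1
    simpa using this.symm
  · by_cases hz : N = 0
    · subst hz; decide
    · have hN0 : N.natAbs ≠ 0 := by omega
      obtain ⟨rest, hr⟩ := toBin_head N.natAbs hN0
      have hok : ∀ c ∈ rest, c = '0' ∨ c = '1' := by
        intro c hc
        exact toBin_mem N.natAbs c (by rw [hr]; exact List.mem_cons_of_mem _ hc)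
      have hb : binTail N = '1' :: rest := by simp [binTail, hneg, hz, hr]
      rw [hb]
      exact (core_eq rest hok 0).symm

-- ===== VERDICT (by name: the statement is the Claim_ definition above) =====
theorem solution_spec : Claim_equal_solution := by
  intro N _
  unfold Spec_solution
  exact solution_eq_alt N
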